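-- pv_equiv track=rewrite | github.com/Yaneww11/SoftUni-Python | Algorithm4thSemester/Exersise/ex1.py | isMask
-- ===== SOURCE A (Python) =====
-- def isMask(mask, word) -> bool:
--     after_mask = ""
--     after_mask_length = 0
--     before_mask = ""
--     before_mask_mask_length = 0
--     isFind = False
--     for index, value in enumerate(mask):
--         if value != '*':
--             if not isFind:
--                 before_mask += value
--                 before_mask_mask_length += 1
--             else:
--                 after_mask += value
--                 after_mask_length += 1
--         else:
--             isFind = True
--             continue
--
--     a = word[: before_mask_mask_length]
--     b = word[len(word) - after_mask_length:]
--     if a == before_mask and b == after_mask: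
--         return True
--     return False
-- ===== SOURCE B (Python) =====
-- def isMask(mask, word) -> bool:
--     before, _, after = mask.partition('*')
--     return word.startswith(before) and word.endswith(after.replace('*', ''))
-- ===== Notes on version B (the rewrite author's own statement) =====
-- stated objective: simpler
-- what changed: Replaces the explicit enumerate loop with manual prefix/suffix accumulation and index arithmetic by mask.partition('*') + replace('*','') and word.startswith/endswith.
import Mathlib
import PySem

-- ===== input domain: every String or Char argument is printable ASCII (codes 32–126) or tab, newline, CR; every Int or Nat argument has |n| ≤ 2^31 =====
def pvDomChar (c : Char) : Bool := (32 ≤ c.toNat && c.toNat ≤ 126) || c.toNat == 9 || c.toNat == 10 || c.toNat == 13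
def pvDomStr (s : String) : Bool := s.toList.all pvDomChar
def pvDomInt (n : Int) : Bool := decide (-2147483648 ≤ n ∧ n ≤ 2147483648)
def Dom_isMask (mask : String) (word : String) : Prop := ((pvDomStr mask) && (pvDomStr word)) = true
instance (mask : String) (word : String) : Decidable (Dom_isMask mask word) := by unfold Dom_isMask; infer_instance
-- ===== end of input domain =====

-- B replaces A's index-counting accumulation loop by str.partition/replace plus
-- startswith/endswith (objective: simpler).

-- ===== PORT A =====
-- the loop state: (after_mask, after_mask_length, before_mask, before_mask_mask_length, isFind)
def isMaskStep (st : List Char × Int × List Char × Int × Bool) (c : Char) :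
    List Char × Int × List Char × Int × Bool :=
  let (am, al, bm, bl, f) := st
  if c ≠ '*' then
    if !f then (am, al, bm ++ [c], bl + 1, f)
    else (am ++ [c], al + 1, bm, bl, f)
  else (am, al, bm, bl, true)

def isMask (mask : String) (word : String) : Bool :=
  let st := mask.toList.foldl isMaskStep ([], 0, [], 0, false)
  let (am, al, bm, bl, _) := st
  let a := PySem.List.slice word.toList none (some bl)                                   -- word[: before_mask_mask_length]
  let b := PySem.List.slice word.toList (some ((PySem.Str.len word : Int) - al)) none    -- word[len(word) - after_mask_length:]
  if a = bm ∧ b = am then true else false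

-- ===== PORT B =====
def isMask_alt (mask : String) (word : String) : Bool :=
  -- mask.partition('*') for the one-character separator '*' (exact): before = the chars up to
  -- the first '*', after = everything past it (empty when '*' is absent)
  let cs := mask.toList
  let before := cs.takeWhile (fun c => c ≠ '*')
  let after := (cs.dropWhile (fun c => c ≠ '*')).drop 1
  PySem.Chars.startswith word.toList before &&
    PySem.Chars.endswith word.toList (PySem.Chars.replace after ['*'] [])

-- ===== PRECONDITION & SPEC =====
def Spec_isMask (mask : String) (word : String) (out : Bool) : Prop := out = isMask_alt mask word
instance (mask : String) (word : String) (out : Bool) : Decidable (Spec_isMask mask word out) := by unfold Spec_isMask; infer_instance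

-- ===== CLAIM (what is proved, stated in full; the proofs are below) =====
def Claim_equal_isMask : Prop := ∀ (mask : String) (word : String), Dom_isMask mask word → Spec_isMask mask word (isMask mask word)

-- ===== LEMMAS AND PROOFS =====

-- str.replace('*', '') removes every '*'
theorem replace_star_go (fuel : Nat) : ∀ (l acc : List Char), l.length ≤ fuel →
    PySem.Chars.replace.go ['*'] [] fuel l acc = acc.reverse ++ l.filter (fun c => c ≠ '*') := by
  induction fuel with
  | zero =>
    intro l acc h
    have : l = [] := List.eq_nil_of_length_eq_zero (Nat.le_zero.mp h)
    subst this; simp [PySem.Chars.replace.go]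
  | succ n ih =>
    intro l acc h
    cases l with
    | nil => simp [PySem.Chars.replace.go]
    | cons c t =>
      have ht : t.length ≤ n := by simp only [List.length_cons] at h; omega
      by_cases hc : c = '*'
      · subst hc
        rw [PySem.Chars.replace.go]
        simp [List.isPrefixOf, ih t acc ht]
      · rw [PySem.Chars.replace.go]
        have hpre : List.isPrefixOf ['*'] (c :: t) = false := by
          simp [List.isPrefixOf]; exact fun hh => absurd hh.symm hc
        simp only [hpre, Bool.false_eq_true, if_false]
        rw [ih t (c :: acc) ht]
        simp [hc]

theorem replace_star (l : List Char) :
    PySem.Chars.replace l ['*'] [] = l.filter (fun c => c ≠ '*') := by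
  rw [PySem.Chars.replace]
  simp only [List.isEmpty_cons, Bool.false_eq_true, if_false]
  rw [replace_star_go l.length l [] le_rfl]
  simp

-- the loop after the '*' has been seen: every non-star char goes to after_mask
theorem loop_true (cs : List Char) : ∀ (am : List Char) (al : Int) (bm : List Char) (bl : Int),
    cs.foldl isMaskStep (am, al, bm, bl, true)
      = (am ++ cs.filter (fun c => c ≠ '*'),
         al + ((cs.filter (fun c => c ≠ '*')).length : Int), bm, bl, true) := by
  induction cs with
  | nil => intro am al bm bl; simp
  | cons c t ih =>
    intro am al bm bl
    by_cases hc : c = '*'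
    · subst hc; simp [isMaskStep, ih]
    · simp only [List.foldl_cons, isMaskStep, if_pos hc, Bool.not_true, if_neg, hc]
      simp only [ne_eq, hc, not_false_eq_true, if_pos, Bool.not_true, Bool.false_eq_true, if_false]
      rw [ih]
      simp [hc]
      ring

-- the whole loop, from the initial (not-yet-found) state
theorem loop_false (cs : List Char) : ∀ (am : List Char) (al : Int) (bm : List Char) (bl : Int),
    cs.foldl isMaskStep (am, al, bm, bl, false)
      = (am ++ (((cs.dropWhile (fun c => c ≠ '*')).drop 1).filter (fun c => c ≠ '*')),
         al + ((((cs.dropWhile (fun c => c ≠ '*')).drop 1).filter (fun c => c ≠ '*')).length : Int),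
         bm ++ cs.takeWhile (fun c => c ≠ '*'),
         bl + ((cs.takeWhile (fun c => c ≠ '*')).length : Int),
         decide ('*' ∈ cs)) := by
  induction cs with
  | nil => intro am al bm bl; simp
  | cons c t ih =>
    intro am al bm bl
    by_cases hc : c = '*'
    · subst hc
      simp only [List.foldl_cons, isMaskStep, ne_eq, not_true_eq_false, if_false, if_neg,
        not_not]
      rw [loop_true]
      simp [List.dropWhile, List.takeWhile]
    · simp only [List.foldl_cons, isMaskStep, ne_eq, hc, not_false_eq_true, if_pos,
        Bool.not_false, if_true]
      rw [ih]
      have hd : List.dropWhile (fun c => decide ¬c = '*') (c :: t)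
          = List.dropWhile (fun c => decide ¬c = '*') t := by
        simp [List.dropWhile, hc]
      have ht : List.takeWhile (fun c => decide ¬c = '*') (c :: t)
          = c :: List.takeWhile (fun c => decide ¬c = '*') t := by
        simp [List.takeWhile, hc]
      simp only [ne_eq] at *
      rw [hd, ht]
      simp [List.mem_cons]
      constructor
      · ring
      · exact fun h => absurd h.symm hc

-- "word[:len(p)] == p" is startswith
theorem slice_prefix (w p : List Char) :
    decide (PySem.List.slice w none (some (p.length : Int)) = p) = PySem.Chars.startswith w p := by
  rw [PySem.List.slice_to_natCast]
  by_cases h : p <+: w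
  · rw [(PySem.Chars.startswith_iff w p).mpr h]
    exact decide_eq_true (List.prefix_iff_eq_take.mp h).symm
  · have hs : PySem.Chars.startswith w p = false := by
      rw [Bool.eq_false_iff]
      intro hb; exact h ((PySem.Chars.startswith_iff w p).mp hb)
    rw [hs]
    exact decide_eq_false (fun hh => h (List.prefix_iff_eq_take.mpr hh.symm))

-- "word[len(word) - len(s):] == s" is endswith (also when s is longer than word:
-- the slice then wraps to a strict suffix of word, shorter than s, and both sides are false)
theorem slice_suffix (w s : List Char) :
    decide (PySem.List.slice w (some ((w.length : Int) - (s.length : Int))) none = s)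
      = PySem.Chars.endswith w s := by
  by_cases hl : s.length ≤ w.length
  · have hcast : (w.length : Int) - (s.length : Int) = ((w.length - s.length : Nat) : Int) := by
      omega
    rw [hcast, PySem.List.slice_from_natCast]
    by_cases h : s <:+ w
    · rw [(PySem.Chars.endswith_iff w s).mpr h]
      exact decide_eq_true (List.suffix_iff_eq_drop.mp h).symm
    · have hs : PySem.Chars.endswith w s = false := by
        rw [Bool.eq_false_iff]
        intro hb; exact h ((PySem.Chars.endswith_iff w s).mp hb)
      rw [hs]
      exact decide_eq_false (fun hh => h (List.suffix_iff_eq_drop.mpr hh.symm))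
  · -- s longer than word: slice start is negative, Python wraps; both comparisons are false
    have hk : 0 < s.length - w.length := by omega
    have hcast : (w.length : Int) - (s.length : Int) = -(((s.length - w.length : Nat)) : Int) := by
      omega
    rw [hcast, PySem.List.slice_from_neg_natCast w _ hk]
    have hlen : (w.drop (w.length - (s.length - w.length))).length < s.length := by
      simp [List.length_drop]; omega
    have hne : ¬ w.drop (w.length - (s.length - w.length)) = s := by
      intro hh; rw [hh] at hlen; omega
    have hns : ¬ s <:+ w := fun hh => by have := hh.length_le; omega
    have hs : PySem.Chars.endswith w s = false := by
      rw [Bool.eq_false_iff]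
      intro hb; exact hns ((PySem.Chars.endswith_iff w s).mp hb)
    simp [hs, hne]

theorem isMask_eq_alt (mask word : String) : isMask mask word = isMask_alt mask word := by
  unfold isMask isMask_alt
  rw [loop_false]
  simp only [List.nil_append, Int.zero_add, zero_add]
  rw [replace_star]
  rw [← slice_prefix, ← slice_suffix]
  simp only [PySem.Str.len_eq, PySem.Chars.len_eq]
  by_cases h1 : PySem.List.slice word.toList none
      (some (((mask.toList.takeWhile (fun c => c ≠ '*')).length : Int))) =
      mask.toList.takeWhile (fun c => c ≠ '*') <;>
  by_cases h2 : PySem.List.slice word.toList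
      (some ((word.toList.length : Int) -
        ((((mask.toList.dropWhile (fun c => c ≠ '*')).drop 1).filter (fun c => c ≠ '*')).length : Int))) none =
      ((mask.toList.dropWhile (fun c => c ≠ '*')).drop 1).filter (fun c => c ≠ '*') <;>
  simp [h1, h2]

-- ===== VERDICT (by name: the statement is the Claim_ definition above) =====
theorem isMask_spec : Claim_equal_isMask := by
  intro mask word _
  unfold Spec_isMask
  exact isMask_eq_alt mask word
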